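-- pv_equiv track=rewrite | github.com/shrine2000/DSA | 2866-beautiful-towers-ii/2866-beautiful-towers-ii.py | calculate_heights_sum
-- ===== SOURCE A (Python) =====
-- from typing import List
--
-- def calculate_heights_sum(heights: List[int]) -> List[int]:
--     n = len(heights)
--     stack = [-1]
--     res = [0] * n
--     for i in range(n):
--         while len(stack) > 1 and heights[stack[-1]] > heights[i]:
--             j = stack.pop()
--         res[i] = res[stack[-1]] + (i - stack[-1]) * heights[i]
--         stack.append(i)
--     return res
-- ===== SOURCE B (Python) =====
-- from typing import List
--
-- def calculate_heights_sum(heights: List[int]) -> List[int]: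
--     n = len(heights)
--     prev = [-1] * n  # prev[i] = nearest j < i with heights[j] <= heights[i], else -1
--     res = []
--     for i in range(n):
--         j = i - 1
--         while j != -1 and heights[j] > heights[i]:
--             j = prev[j]
--         prev[i] = j
--         res.append((res[j] if j != -1 else 0) + (i - j) * heights[i])
--     return res
-- ===== Notes on version B (the rewrite author's own statement) =====
-- stated objective: alternative
-- what changed: Replaces the monotonic stack (pops, res[stack[-1]] and the -1 sentinel read) by a memoized previous-smaller-or-equal array chased via jump pointers, building the result by appending the recurrence value directly.
import Mathlib
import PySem

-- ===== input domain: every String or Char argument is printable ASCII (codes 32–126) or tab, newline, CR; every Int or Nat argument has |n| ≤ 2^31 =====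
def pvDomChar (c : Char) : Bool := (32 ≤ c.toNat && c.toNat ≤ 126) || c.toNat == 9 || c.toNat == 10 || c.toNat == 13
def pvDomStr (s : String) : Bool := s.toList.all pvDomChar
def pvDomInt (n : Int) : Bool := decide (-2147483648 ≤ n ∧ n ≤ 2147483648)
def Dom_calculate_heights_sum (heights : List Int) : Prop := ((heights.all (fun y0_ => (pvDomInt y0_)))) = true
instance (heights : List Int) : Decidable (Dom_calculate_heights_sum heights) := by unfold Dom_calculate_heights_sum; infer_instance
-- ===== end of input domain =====

-- B replaces A's monotonic stack (pops, res[stack[-1]], -1 sentinel read) by a memoized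
-- previous-smaller-or-equal array chased via jump pointers, appending the recurrence value.

-- ===== PORT A =====
-- Python stack is ported with its top (stack[-1]) at the HEAD of the Lean list.
-- 'while len(stack) > 1 and heights[stack[-1]] > heights[i]: stack.pop()'
-- (the [x] case is 'len(stack) == 1': the loop stops without reading heights).
def aPop (heights : List Int) (hi : Int) : List Int → List Int
  | [] => []
  | [x] => [x]
  | t :: u :: rest =>
      if (PySem.List.pyGet? heights t).getD 0 > hi then aPop heights hi (u :: rest)
      else t :: u :: rest

-- one iteration of 'for i in range(n)'; state = (stack, res); indices read are always in range,
-- so the '.getD 0' on pyGet? never supplies its default.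
def aStep (heights : List Int) (st : List Int × List Int) (i : Nat) : List Int × List Int :=
  let hi := (PySem.List.pyGet? heights (i : Int)).getD 0
  let stack := aPop heights hi st.1
  let t := stack.headD (-1)
  let r := (PySem.List.pyGet? st.2 t).getD 0
  ((i : Int) :: stack, st.2.set i (r + ((i : Int) - t) * hi))

def calculate_heights_sum (heights : List Int) : List Int :=
  ((List.range heights.length).foldl (aStep heights)
    ([-1], List.replicate heights.length 0)).2

-- ===== PORT B =====
-- 'while j != -1 and heights[j] > heights[i]: j = prev[j]', ported with fuel i+1: j starts at
-- i-1 and strictly decreases while staying ≥ -1, so at most i iterations run and the fuel is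
-- never exhausted; indices read are always in range.
def bChase (heights prev : List Int) (hi : Int) : Nat → Int → Int
  | 0, j => j
  | fuel + 1, j =>
      if j ≠ -1 ∧ (PySem.List.pyGet? heights j).getD 0 > hi then
        bChase heights prev hi fuel ((PySem.List.pyGet? prev j).getD (-1))
      else j

-- one iteration of 'for i in range(n)'; state = (prev, res)
def bStep (heights : List Int) (st : List Int × List Int) (i : Nat) : List Int × List Int :=
  let hi := (PySem.List.pyGet? heights (i : Int)).getD 0
  let j := bChase heights st.1 hi (i + 1) ((i : Int) - 1)
  (st.1.set i j,
   st.2 ++ [(if j ≠ -1 then (PySem.List.pyGet? st.2 j).getD 0 else 0) + ((i : Int) - j) * hi])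

def calculate_heights_sum_alt (heights : List Int) : List Int :=
  ((List.range heights.length).foldl (bStep heights)
    (List.replicate heights.length (-1), [])).2

-- ===== PRECONDITION & SPEC =====
def Spec_calculate_heights_sum (heights : List Int) (out : List Int) : Prop := out = calculate_heights_sum_alt heights
instance (heights : List Int) (out : List Int) : Decidable (Spec_calculate_heights_sum heights out) := by unfold Spec_calculate_heights_sum; infer_instance

-- ===== CLAIM (what is proved, stated in full; the proofs are below) =====
def Claim_equal_calculate_heights_sum : Prop := ∀ (heights : List Int), Dom_calculate_heights_sum heights → Spec_calculate_heights_sum heights (calculate_heights_sum heights)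

-- ===== LEMMAS AND PROOFS =====

-- previous smaller-or-equal index: pseGo h c k scans k-1, k-2, …, 0 for the first j with h[j] ≤ c
def pseGo (heights : List Int) (c : Int) : Nat → Option Nat
  | 0 => none
  | k + 1 => if heights.getD k 0 ≤ c then some k else pseGo heights c k

def pse (heights : List Int) (i : Nat) : Option Nat := pseGo heights (heights.getD i 0) i

theorem pseGo_lt (heights : List Int) (c : Int) :
    ∀ k p, pseGo heights c k = some p → p < k := by
  intro k
  induction k with
  | zero => intro p h; simp [pseGo] at h
  | succ k ih =>
      intro p h
      simp only [pseGo] at h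
      split at h
      · injection h with h'; omega
      · exact Nat.lt_succ_of_lt (ih p h)

theorem pse_lt (heights : List Int) (i p : Nat) (h : pse heights i = some p) : p < i :=
  pseGo_lt heights _ i p h

theorem pseGo_le (heights : List Int) (c : Int) :
    ∀ k p, pseGo heights c k = some p → heights.getD p 0 ≤ c := by
  intro k
  induction k with
  | zero => intro p h; simp [pseGo] at h
  | succ k ih =>
      intro p h
      simp only [pseGo] at h
      split at h
      · cases h; assumption
      · exact ih p h

theorem pseGo_gt (heights : List Int) (c : Int) :
    ∀ k p, pseGo heights c k = some p → ∀ j, p < j → j < k → c < heights.getD j 0 := by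
  intro k
  induction k with
  | zero => intro p h; simp [pseGo] at h
  | succ k ih =>
      intro p h j hpj hjk
      simp only [pseGo] at h
      split at h
      · injection h with h'; omega
      · rcases Nat.lt_succ_iff_lt_or_eq.mp hjk with hj | hj
        · exact ih p h j hpj hj
        · subst hj; omega

theorem pseGo_none (heights : List Int) (c : Int) :
    ∀ k, pseGo heights c k = none → ∀ j, j < k → c < heights.getD j 0 := by
  intro k
  induction k with
  | zero => intro _ j hj; omega
  | succ k ih =>
      intro h j hj
      simp only [pseGo] at h
      split at h
      · simp at h
      · rcases Nat.lt_succ_iff_lt_or_eq.mp hj with hj' | hj'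
        · exact ih h j hj'
        · subst hj'; omega

theorem pseGo_eq_none (heights : List Int) (c : Int) :
    ∀ k, (∀ j, j < k → c < heights.getD j 0) → pseGo heights c k = none := by
  intro k
  induction k with
  | zero => intro _; rfl
  | succ k ih =>
      intro hall
      have hk := hall k (Nat.lt_succ_self k)
      simp only [pseGo, if_neg (by omega : ¬ heights.getD k 0 ≤ c)]
      exact ih (fun j hj => hall j (Nat.lt_succ_of_lt hj))

theorem pseGo_isSome (heights : List Int) (c : Int) (k p : Nat)
    (hp : p < k) (hle : heights.getD p 0 ≤ c) : (pseGo heights c k).isSome := by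
  cases h : pseGo heights c k with
  | some q => rfl
  | none => exact absurd (pseGo_none heights c k h p hp) (by omega)

-- pse i = some k exactly when k < i, h[k] ≤ h[i], and everything strictly between is larger
theorem pse_eq_some (heights : List Int) (i k : Nat) (hk : k < i)
    (hle : heights.getD k 0 ≤ heights.getD i 0)
    (hgt : ∀ j, k < j → j < i → heights.getD i 0 < heights.getD j 0) :
    pse heights i = some k := by
  have hs := pseGo_isSome heights (heights.getD i 0) i k hk hle
  cases h : pse heights i with
  | none =>
      have h' : pseGo heights (heights.getD i 0) i = none := h
      rw [h'] at hs; simp at hs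
  | some q =>
      have hq1 := pseGo_le heights _ i q h
      have hq2 := pseGo_gt heights _ i q h
      have hqi := pseGo_lt heights _ i q h
      have hqk : q = k := by
        rcases Nat.lt_trichotomy q k with h1 | h1 | h1
        · exact absurd (hq2 k h1 hk) (by omega)
        · exact h1
        · exact absurd (hgt q h1 hqi) (by omega)
      exact congrArg some hqk

-- the intended value: g i = Σ_{k=0..i} min(heights[k..i]), via the PSE recurrence
def g (heights : List Int) (i : Nat) : Int :=
  if hp : (pse heights i).isSome then
    g heights ((pse heights i).get hp)
      + ((i : Int) - (((pse heights i).get hp : Nat) : Int)) * heights.getD i 0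
  else ((i : Int) + 1) * heights.getD i 0
termination_by i
decreasing_by exact pse_lt heights i _ (Option.some_get hp).symm

theorem g_none (heights : List Int) (i : Nat) (hp : pse heights i = none) :
    g heights i = ((i : Int) + 1) * heights.getD i 0 := by
  rw [g]; simp [hp]

theorem g_some (heights : List Int) (i p : Nat) (hp : pse heights i = some p) :
    g heights i = g heights p + ((i : Int) - (p : Int)) * heights.getD i 0 := by
  rw [g]; simp [hp]

-- the PSE chain: exactly what A's stack holds (top first, -1 sentinel at the bottom)
def chain (heights : List Int) (i : Nat) : List Int :=
  if hp : (pse heights i).isSome then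
    (i : Int) :: chain heights ((pse heights i).get hp)
  else [(i : Int), -1]
termination_by i
decreasing_by exact pse_lt heights i _ (Option.some_get hp).symm

theorem chain_none (heights : List Int) (i : Nat) (hp : pse heights i = none) :
    chain heights i = [(i : Int), -1] := by
  rw [chain]; simp [hp]

theorem chain_some (heights : List Int) (i p : Nat) (hp : pse heights i = some p) :
    chain heights i = (i : Int) :: chain heights p := by
  rw [chain]; simp [hp]

theorem chain_shape (heights : List Int) (p : Nat) :
    ∃ tl, chain heights p = (p : Int) :: tl ∧ tl ≠ [] := by
  induction p using Nat.strong_induction_on with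
  | _ p ih =>
      cases hp : pse heights p with
      | none => exact ⟨[-1], chain_none heights p hp, by simp⟩
      | some q =>
          refine ⟨chain heights q, chain_some heights p q hp, ?_⟩
          rcases ih q (pse_lt heights p q hp) with ⟨tl, htl, _⟩
          simp [htl]

-- what the pop loop must produce: the chain of pse i (or just the sentinel)
def popTarget (heights : List Int) (i : Nat) : List Int :=
  match pse heights i with
  | none => [-1]
  | some p => chain heights p

theorem chain_eq_cons_popTarget (heights : List Int) (i : Nat) :
    chain heights i = (i : Int) :: popTarget heights i := by
  cases hp : pse heights i with
  | none => rw [chain_none heights i hp]; simp [popTarget, hp]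
  | some p => rw [chain_some heights i p hp]; simp [popTarget, hp]

theorem popTarget_headD (heights : List Int) (i : Nat) :
    (popTarget heights i).headD (-1) =
      match pse heights i with
      | none => (-1 : Int)
      | some p => (p : Int) := by
  cases hp : pse heights i with
  | none => simp [popTarget, hp]
  | some p =>
      rcases chain_shape heights p with ⟨tl, htl, _⟩
      simp [popTarget, hp, htl]

-- heights[t] for a stack entry t = (k : Nat), read through pyGet? as the port does
theorem pyGetD_nat (heights : List Int) (k : Nat) :
    (PySem.List.pyGet? heights (k : Int)).getD 0 = heights.getD k 0 := by
  rw [PySem.List.pyGet?_natCast, List.getD_eq_getElem?_getD]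

theorem aPop_stay (heights : List Int) (hi t u : Int) (rest : List Int)
    (h : ¬ ((PySem.List.pyGet? heights t).getD 0 > hi)) :
    aPop heights hi (t :: u :: rest) = t :: u :: rest := by
  simp only [aPop, if_neg h]

theorem aPop_pop (heights : List Int) (hi t u : Int) (rest : List Int)
    (h : (PySem.List.pyGet? heights t).getD 0 > hi) :
    aPop heights hi (t :: u :: rest) = aPop heights hi (u :: rest) := by
  simp only [aPop, if_pos h]

-- the pop loop lands exactly on the PSE target
theorem popChain (heights : List Int) (i : Nat) :
    ∀ k, k < i → (∀ j, k < j → j < i → heights.getD i 0 < heights.getD j 0) →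
      aPop heights (heights.getD i 0) (chain heights k) = popTarget heights i := by
  intro k
  induction k using Nat.strong_induction_on with
  | _ k ih =>
      intro hki hbig
      by_cases hk : heights.getD k 0 ≤ heights.getD i 0
      · -- stop: top k stays, and pse i = some k
        have hpi : pse heights i = some k := pse_eq_some heights i k hki hk hbig
        have htarget : popTarget heights i = chain heights k := by simp [popTarget, hpi]
        rw [htarget]
        rcases chain_shape heights k with ⟨tl, htl, hne⟩
        rcases List.exists_cons_of_ne_nil hne with ⟨u, rest, hrest⟩
        rw [htl, hrest]
        exact aPop_stay heights _ _ u rest (by rw [pyGetD_nat]; omega)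
      · -- pop k and continue
        rw [not_le] at hk
        cases hpk : pse heights k with
        | none =>
            rw [chain_none heights k hpk]
            rw [aPop_pop heights _ _ (-1) [] (by rw [pyGetD_nat]; omega)]
            have hnone : pse heights i = none := by
              apply pseGo_eq_none
              intro j hj
              rcases Nat.lt_trichotomy j k with h1 | h1 | h1
              · exact lt_trans hk (pseGo_none heights _ k hpk j h1)
              · subst h1; exact hk
              · exact hbig j h1 hj
            simp [popTarget, hnone, aPop]
        | some p =>
            have hpklt := pse_lt heights k p hpk
            rw [chain_some heights k p hpk]
            rcases chain_shape heights p with ⟨tl, htl, _⟩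
            rw [htl]
            rw [aPop_pop heights _ _ (p : Int) tl (by rw [pyGetD_nat]; omega), ← htl]
            exact ih p hpklt (by omega) (by
              intro j hpj hji
              rcases Nat.lt_trichotomy j k with h1 | h1 | h1
              · exact lt_trans hk (pseGo_gt heights _ k p hpk j hpj h1)
              · subst h1; exact hk
              · exact hbig j h1 hji)

-- A's res array after i steps
def resOf (heights : List Int) (i : Nat) : List Int :=
  (List.range heights.length).map (fun j => if j < i then g heights j else 0)

theorem resOf_zero (heights : List Int) :
    resOf heights 0 = List.replicate heights.length 0 := by
  apply List.ext_getElem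
  · simp [resOf]
  · intro j h1 h2
    simp [resOf]

theorem length_resOf (heights : List Int) (i : Nat) :
    (resOf heights i).length = heights.length := by simp [resOf]

def stackOf (heights : List Int) : Nat → List Int
  | 0 => [-1]
  | i + 1 => chain heights i

theorem pop_stackOf (heights : List Int) (i : Nat) :
    aPop heights (heights.getD i 0) (stackOf heights i) = popTarget heights i := by
  cases i with
  | zero =>
      have : pse heights 0 = none := rfl
      simp [stackOf, aPop, popTarget, this]
  | succ k =>
      exact popChain heights (k + 1) k (Nat.lt_succ_self k) (by omega)

-- reading res at the stack-top index (the -1 sentinel reads the still-zero last slot)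
theorem read_res (heights : List Int) (i : Nat) (hi : i < heights.length) :
    (PySem.List.pyGet? (resOf heights i) ((popTarget heights i).headD (-1))).getD 0 =
      match pse heights i with
      | none => (0 : Int)
      | some p => g heights p := by
  rw [popTarget_headD]
  cases hp : pse heights i with
  | none =>
      rw [PySem.List.pyGet?_neg_one]
      have hlen : (resOf heights i).length = heights.length := length_resOf heights i
      have hne : resOf heights i ≠ [] := by
        intro h; rw [h] at hlen; simp at hlen; omega
      rw [List.getLast?_eq_getElem?, hlen]
      have hl : heights.length - 1 < (resOf heights i).length := by rw [hlen]; omega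
      rw [List.getElem?_eq_getElem hl]
      have : ¬ (heights.length - 1 < i) := by omega
      simp [resOf, this]
  | some p =>
      have hpi := pse_lt heights i p hp
      rw [PySem.List.pyGet?_natCast]
      have hl : p < (resOf heights i).length := by rw [length_resOf]; omega
      rw [List.getElem?_eq_getElem hl]
      simp [resOf, hpi]

theorem set_resOf (heights : List Int) (i : Nat) (hi : i < heights.length) :
    (resOf heights i).set i (g heights i) = resOf heights (i + 1) := by
  apply List.ext_getElem
  · simp [resOf]
  · intro j h1 h2
    simp only [resOf, List.getElem_set, List.getElem_map, List.getElem_range]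
    have hj : j < heights.length := by simpa [resOf] using h2
    by_cases h : j = i
    · subst h; simp
    · rw [if_neg (fun he => h he.symm)]; split_ifs <;> first | rfl | omega

theorem aStep_eq (heights : List Int) (i : Nat) (hi : i < heights.length) :
    aStep heights (stackOf heights i, resOf heights i) i
      = (stackOf heights (i + 1), resOf heights (i + 1)) := by
  cases hp : pse heights i with
  | none =>
      have ht : (popTarget heights i).headD (-1) = -1 := by rw [popTarget_headD, hp]
      have hr : (PySem.List.pyGet? (resOf heights i) ((popTarget heights i).headD (-1))).getD 0
          = 0 := by rw [read_res heights i hi, hp]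
      rw [ht] at hr
      unfold aStep
      simp only [pyGetD_nat heights i, pop_stackOf, ht, hr]
      rw [Prod.mk.injEq]
      refine ⟨(chain_eq_cons_popTarget heights i).symm, ?_⟩
      rw [← set_resOf heights i hi]
      congr 1
      rw [g_none heights i hp]; ring
  | some p =>
      have ht : (popTarget heights i).headD (-1) = (p : Int) := by rw [popTarget_headD, hp]
      have hr : (PySem.List.pyGet? (resOf heights i) ((popTarget heights i).headD (-1))).getD 0
          = g heights p := by rw [read_res heights i hi, hp]
      rw [ht] at hr
      unfold aStep
      simp only [pyGetD_nat heights i, pop_stackOf, ht, hr]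
      rw [Prod.mk.injEq]
      refine ⟨(chain_eq_cons_popTarget heights i).symm, ?_⟩
      rw [← set_resOf heights i hi]
      congr 1
      rw [g_some heights i p hp]

theorem loop_eq (heights : List Int) :
    ∀ i, i ≤ heights.length →
      (List.range i).foldl (aStep heights) ([-1], resOf heights 0)
        = (stackOf heights i, resOf heights i) := by
  intro i
  induction i with
  | zero => intro _; simp [stackOf]
  | succ k ih =>
      intro h
      rw [List.range_succ, List.foldl_append, ih (by omega)]
      simpa using aStep_eq heights k (by omega)

theorem calcA_eq_resOf (heights : List Int) :
    calculate_heights_sum heights = resOf heights heights.length := by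
  unfold calculate_heights_sum
  rw [← resOf_zero, loop_eq heights heights.length (le_refl _)]

-- ===== B-side: the jump-pointer chase lands on the same PSE target =====

def pseInt (heights : List Int) (i : Nat) : Int :=
  match pse heights i with
  | none => -1
  | some p => (p : Int)

-- B's prev array after i steps
def prevOf (heights : List Int) (i : Nat) : List Int :=
  (List.range heights.length).map (fun m => if m < i then pseInt heights m else -1)

-- B's res list after i steps
def gList (heights : List Int) (i : Nat) : List Int := (List.range i).map (g heights)

theorem length_prevOf (heights : List Int) (i : Nat) :
    (prevOf heights i).length = heights.length := by simp [prevOf]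

theorem bChase_neg_one (heights prev : List Int) (hi : Int) (fuel : Nat) :
    bChase heights prev hi fuel (-1) = -1 := by
  cases fuel with
  | zero => rfl
  | succ f => simp [bChase]

theorem prevOf_get (heights : List Int) (i k : Nat) (hk : k < i) (hn : k < heights.length) :
    (PySem.List.pyGet? (prevOf heights i) (k : Int)).getD (-1) = pseInt heights k := by
  rw [PySem.List.pyGet?_natCast]
  have hl : k < (prevOf heights i).length := by rw [length_prevOf]; omega
  rw [List.getElem?_eq_getElem hl]
  simp [prevOf, hk]

theorem chase_eq (heights : List Int) (i : Nat) (hn : i ≤ heights.length) :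
    ∀ k fuel, k < i → k + 2 ≤ fuel →
      (∀ j, k < j → j < i → heights.getD i 0 < heights.getD j 0) →
      bChase heights (prevOf heights i) (heights.getD i 0) fuel (k : Int) = pseInt heights i := by
  intro k
  induction k using Nat.strong_induction_on with
  | _ k ih =>
      intro fuel hki hfuel hbig
      obtain ⟨f, rfl⟩ : ∃ f, fuel = f + 1 := ⟨fuel - 1, by omega⟩
      by_cases hk : heights.getD k 0 ≤ heights.getD i 0
      · -- the chase stops at k, and pse i = some k
        have hpi : pse heights i = some k := pse_eq_some heights i k hki hk hbig
        have hcond : ¬ ((k : Int) ≠ -1 ∧ (PySem.List.pyGet? heights (k : Int)).getD 0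
            > heights.getD i 0) := by
          rw [pyGetD_nat]; intro h; exact absurd h.2 (by omega)
        simp only [bChase, if_neg hcond, pseInt, hpi]
      · rw [not_le] at hk
        have hcond : (k : Int) ≠ -1 ∧ (PySem.List.pyGet? heights (k : Int)).getD 0
            > heights.getD i 0 := ⟨by omega, by rw [pyGetD_nat]; omega⟩
        rw [show bChase heights (prevOf heights i) (heights.getD i 0) (f + 1) (k : Int)
            = bChase heights (prevOf heights i) (heights.getD i 0) f
                ((PySem.List.pyGet? (prevOf heights i) (k : Int)).getD (-1)) from by
          simp only [bChase, if_pos hcond]]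
        rw [prevOf_get heights i k hki (by omega)]
        cases hpk : pse heights k with
        | none =>
            have hnone : pse heights i = none := by
              apply pseGo_eq_none
              intro j hj
              rcases Nat.lt_trichotomy j k with h1 | h1 | h1
              · exact lt_trans hk (pseGo_none heights _ k hpk j h1)
              · subst h1; exact hk
              · exact hbig j h1 hj
            simp only [pseInt, hpk, hnone, bChase_neg_one]
        | some p =>
            have hpklt := pse_lt heights k p hpk
            simp only [pseInt, hpk]
            exact ih p hpklt f (by omega) (by omega) (by
              intro j hpj hji
              rcases Nat.lt_trichotomy j k with h1 | h1 | h1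
              · exact lt_trans hk (pseGo_gt heights _ k p hpk j hpj h1)
              · subst h1; exact hk
              · exact hbig j h1 hji)

theorem chase_top (heights : List Int) (i : Nat) (hi : i < heights.length) :
    bChase heights (prevOf heights i) (heights.getD i 0) (i + 1) ((i : Int) - 1)
      = pseInt heights i := by
  cases i with
  | zero =>
      have h0 : ((0 : Nat) : Int) - 1 = -1 := by norm_num
      rw [h0, bChase_neg_one]
      have : pse heights 0 = none := rfl
      simp [pseInt, this]
  | succ k =>
      have hc : ((k + 1 : Nat) : Int) - 1 = (k : Int) := by push_cast; ring
      rw [hc]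
      exact chase_eq heights (k + 1) (by omega) k (k + 2) (by omega) (by omega) (by omega)

theorem set_prevOf (heights : List Int) (i : Nat) (hi : i < heights.length) :
    (prevOf heights i).set i (pseInt heights i) = prevOf heights (i + 1) := by
  apply List.ext_getElem
  · simp [prevOf]
  · intro j h1 h2
    simp only [prevOf, List.getElem_set, List.getElem_map, List.getElem_range]
    by_cases h : j = i
    · subst h; simp
    · rw [if_neg (fun he => h he.symm)]; split_ifs <;> first | rfl | omega

theorem read_gList (heights : List Int) (i : Nat) :
    (if pseInt heights i ≠ -1 then
        (PySem.List.pyGet? (gList heights i) (pseInt heights i)).getD 0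
      else 0) + ((i : Int) - pseInt heights i) * heights.getD i 0 = g heights i := by
  cases hp : pse heights i with
  | none =>
      have h1 : pseInt heights i = -1 := by simp [pseInt, hp]
      rw [h1, if_neg (by omega), g_none heights i hp]
      ring
  | some p =>
      have hpi := pse_lt heights i p hp
      have h1 : pseInt heights i = (p : Int) := by simp [pseInt, hp]
      rw [h1, if_pos (by omega)]
      rw [PySem.List.pyGet?_natCast]
      have hl : p < (gList heights i).length := by simp [gList]; omega
      rw [List.getElem?_eq_getElem hl]
      simp only [Option.getD_some, gList, List.getElem_map, List.getElem_range]
      rw [g_some heights i p hp]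

theorem bStep_eq (heights : List Int) (i : Nat) (hi : i < heights.length) :
    bStep heights (prevOf heights i, gList heights i) i
      = (prevOf heights (i + 1), gList heights (i + 1)) := by
  unfold bStep
  simp only [pyGetD_nat heights i, chase_top heights i hi]
  rw [Prod.mk.injEq]
  refine ⟨set_prevOf heights i hi, ?_⟩
  rw [read_gList heights i]
  simp [gList, List.range_succ]

theorem prevOf_zero (heights : List Int) :
    prevOf heights 0 = List.replicate heights.length (-1) := by
  apply List.ext_getElem
  · simp [prevOf]
  · intro j h1 h2
    simp [prevOf]

theorem bloop_eq (heights : List Int) :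
    ∀ i, i ≤ heights.length →
      (List.range i).foldl (bStep heights) (List.replicate heights.length (-1), [])
        = (prevOf heights i, gList heights i) := by
  intro i
  induction i with
  | zero => intro _; rw [prevOf_zero]; rfl
  | succ k ih =>
      intro h
      rw [List.range_succ, List.foldl_append, ih (by omega)]
      simpa using bStep_eq heights k (by omega)

theorem calcB_eq_gList (heights : List Int) :
    calculate_heights_sum_alt heights = gList heights heights.length := by
  unfold calculate_heights_sum_alt
  rw [bloop_eq heights heights.length (le_refl _)]

theorem resOf_eq_gList (heights : List Int) :
    resOf heights heights.length = gList heights heights.length := by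
  unfold resOf gList
  apply List.map_congr_left
  intro j hj
  rw [if_pos (List.mem_range.mp hj)]

-- ===== VERDICT (by name: the statement is the Claim_ definition above) =====
theorem calculate_heights_sum_spec : Claim_equal_calculate_heights_sum := by
  intro heights _
  unfold Spec_calculate_heights_sum
  rw [calcA_eq_resOf, calcB_eq_gList, resOf_eq_gList]
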